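-- pv_equiv track=rewrite | github.com/HeoYou/algorithm-python | 2021_t_02.py | solution
-- ===== SOURCE A (Python) =====
-- def solution(servers, sticky, requests):
--     dic_lst = [dict() for _ in range(servers)]
--     answer = [[] for _ in range(servers)]
--     pos = 0
--     find = 0
--     for i in requests:
--         for j in range(servers):
--             if dic_lst[j].get(i) != None:
--                 answer[j].append(i)
--                 dic_lst[j][i] = 1
--                 find = 1
--                 break
--         if find == 0:
--             dic_lst[pos][i] = 1
--             answer[pos].append(i)
--             pos = (pos + 1) % servers
--             find = 0
--         else:
--             find = 0
--     return answer
-- ===== SOURCE B (Python) =====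
-- def solution(servers, sticky, requests):
--     # First pass: round-robin assign each distinct request key to a server index.
--     key_map = {}
--     pos = 0
--     for r in requests:
--         if r not in key_map:
--             key_map[r] = pos
--             pos = (pos + 1) % servers
--     # Second pass: bin every request into its server's list.
--     answer = [[] for _ in range(servers)]
--     for r in requests:
--         answer[key_map[r]].append(r)
--     return answer
-- ===== Notes on version B (the rewrite author's own statement) =====
-- stated objective: faster
-- what changed: Replaces the per-request linear scan over all servers' dicts with a single request->server-index map built in one pass plus a separate binning pass.
import Mathlib
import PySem

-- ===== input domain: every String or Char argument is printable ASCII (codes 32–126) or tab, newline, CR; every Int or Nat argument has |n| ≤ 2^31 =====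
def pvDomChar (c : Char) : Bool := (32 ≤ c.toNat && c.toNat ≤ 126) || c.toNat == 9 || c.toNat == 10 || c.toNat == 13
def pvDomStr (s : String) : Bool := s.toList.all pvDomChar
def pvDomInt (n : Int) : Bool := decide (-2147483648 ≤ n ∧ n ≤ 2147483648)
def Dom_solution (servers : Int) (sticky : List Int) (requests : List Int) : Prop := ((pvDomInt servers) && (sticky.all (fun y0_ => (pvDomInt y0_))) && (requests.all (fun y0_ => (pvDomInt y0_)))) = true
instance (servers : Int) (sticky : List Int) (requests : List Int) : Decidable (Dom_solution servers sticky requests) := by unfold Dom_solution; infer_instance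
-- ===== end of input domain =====

-- B replaces A's per-request scan over every server's dict by one request->server map
-- built in a single round-robin pass, then a separate binning pass (asymptotically faster).

-- ===== PORT A =====
-- the inner 'for j in range(servers): … break' loop of A
def aInner (i : Int) (dic : List (PySem.Dict Int Int)) (ans : List (List Int)) :
    List Int → List (PySem.Dict Int Int) × List (List Int) × Int
  | [] => (dic, ans, 0)
  | j :: rest =>
    if ((PySem.List.pyGetD dic j PySem.Dict.empty).get? i).isSome then
      (PySem.List.pySetD dic j ((PySem.List.pyGetD dic j PySem.Dict.empty).insert i 1),
       PySem.List.pySetD ans j (PySem.List.pyGetD ans j [] ++ [i]), 1)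
    else aInner i dic ans rest

-- one iteration of A's outer 'for i in requests' loop; state = (dic_lst, answer, pos)
def aStep (servers : Int)
    (st : List (PySem.Dict Int Int) × List (List Int) × Int) (i : Int) :
    List (PySem.Dict Int Int) × List (List Int) × Int :=
  match aInner i st.1 st.2.1 (PySem.List.pyRange 0 servers 1) with
  | (dic, ans, find) =>
    if find = 0 then
      (PySem.List.pySetD dic st.2.2 ((PySem.List.pyGetD dic st.2.2 PySem.Dict.empty).insert i 1),
       PySem.List.pySetD ans st.2.2 (PySem.List.pyGetD ans st.2.2 [] ++ [i]),
       PySem.Int.mod (st.2.2 + 1) servers)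
    else (dic, ans, st.2.2)

def solution (servers : Int) (sticky : List Int) (requests : List Int) : List (List Int) :=
  let dic0 := (PySem.List.pyRange 0 servers 1).map (fun _ => (PySem.Dict.empty : PySem.Dict Int Int))
  let ans0 := (PySem.List.pyRange 0 servers 1).map (fun _ => ([] : List Int))
  (requests.foldl (aStep servers) (dic0, ans0, 0)).2.1

-- ===== PORT B =====
-- B's first pass: build key_map (request -> server index) with the round-robin pointer
def bAssign (servers : Int) : List Int → PySem.Dict Int Int → Int → PySem.Dict Int Int
  | [], km, _ => km
  | r :: rs, km, pos =>
    if (km.get? r).isSome then bAssign servers rs km pos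
    else bAssign servers rs (km.insert r pos) (PySem.Int.mod (pos + 1) servers)

-- B's second pass: append each request to answer[key_map[r]]
def bBin (km : PySem.Dict Int Int) : List Int → List (List Int) → List (List Int)
  | [], ans => ans
  | r :: rs, ans =>
      bBin km rs (PySem.List.pySetD ans (km.getD r 0)
        (PySem.List.pyGetD ans (km.getD r 0) [] ++ [r]))

def solution_alt (servers : Int) (sticky : List Int) (requests : List Int) : List (List Int) :=
  let km := bAssign servers requests PySem.Dict.empty 0
  bBin km requests ((PySem.List.pyRange 0 servers 1).map (fun _ => ([] : List Int)))

-- ===== PRECONDITION & SPEC =====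
-- Pre_ excludes only servers ≤ 0 with non-empty requests, where A raises IndexError (B raises too).
def Pre_solution (servers : Int) (sticky : List Int) (requests : List Int) : Prop :=
  requests = [] ∨ 1 ≤ servers
instance (servers : Int) (sticky : List Int) (requests : List Int) : Decidable (Pre_solution servers sticky requests) := by unfold Pre_solution; infer_instance
def pvWitness_solution : Int × List Int × List Int := (2, [], [1, 2, 1, 3, 2])

def Spec_solution (servers : Int) (sticky : List Int) (requests : List Int) (out : List (List Int)) : Prop := out = solution_alt servers sticky requests
instance (servers : Int) (sticky : List Int) (requests : List Int) (out : List (List Int)) : Decidable (Spec_solution servers sticky requests out) := by unfold Spec_solution; infer_instance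

-- ===== CLAIM (what is proved, stated in full; the proofs are below) =====
def Claim_equal_solution : Prop := ∀ (servers : Int) (sticky : List Int) (requests : List Int), Dom_solution servers sticky requests → Pre_solution servers sticky requests → Spec_solution servers sticky requests (solution servers sticky requests)

-- ===== LEMMAS AND PROOFS =====
-- Invariant: dic has exactly `servers` slots, slot j's key set is {k | km[k] = j},
-- and every value stored in km is a valid server index.
def PvInv (servers : Int) (dic : List (PySem.Dict Int Int)) (km : PySem.Dict Int Int) : Prop :=
  dic.length = servers.toNat ∧
  (∀ (jn : Nat) (hj : jn < dic.length) (k : Int),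
      ((dic[jn]'hj).get? k).isSome ↔ km.get? k = some (jn : Int)) ∧
  (∀ k v, km.get? k = some v → 0 ≤ v ∧ v < servers)

lemma inner_none (i : Int) (dic : List (PySem.Dict Int Int)) (ans : List (List Int))
    (servers a : Int)
    (h : ∀ j, a ≤ j → j < servers →
        ((PySem.List.pyGetD dic j PySem.Dict.empty).get? i).isSome = false) :
    aInner i dic ans (PySem.List.pyRange a servers 1) = (dic, ans, 0) := by
  by_cases hle : servers ≤ a
  · rw [PySem.List.pyRange_one_eq_nil hle]; rfl
  · rw [PySem.List.pyRange_one_cons (by omega)]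
    simp only [aInner, h a le_rfl (by omega), Bool.false_eq_true, if_false]
    exact inner_none i dic ans servers (a + 1) (fun j h1 h2 => h j (by omega) h2)
termination_by (servers - a).toNat
decreasing_by omega

lemma inner_found (i : Int) (dic : List (PySem.Dict Int Int)) (ans : List (List Int))
    (servers a j : Int) (ha : a ≤ j) (hj : j < servers)
    (hhit : ((PySem.List.pyGetD dic j PySem.Dict.empty).get? i).isSome = true)
    (hmiss : ∀ j', a ≤ j' → j' < j →
        ((PySem.List.pyGetD dic j' PySem.Dict.empty).get? i).isSome = false) :
    aInner i dic ans (PySem.List.pyRange a servers 1) =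
      (PySem.List.pySetD dic j ((PySem.List.pyGetD dic j PySem.Dict.empty).insert i 1),
       PySem.List.pySetD ans j (PySem.List.pyGetD ans j [] ++ [i]), 1) := by
  rw [PySem.List.pyRange_one_cons (by omega)]
  by_cases hja : a = j
  · subst hja
    simp only [aInner, hhit, if_true]
  · simp only [aInner, hmiss a le_rfl (by omega), Bool.false_eq_true, if_false]
    exact inner_found i dic ans servers (a + 1) j (by omega) hj hhit
      (fun j' h1 h2 => hmiss j' (by omega) h2)
termination_by (j - a).toNat
decreasing_by omega

lemma bAssign_mono (servers : Int) (rs : List Int) (km : PySem.Dict Int Int) (pos k v : Int)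
    (h : km.get? k = some v) : (bAssign servers rs km pos).get? k = some v := by
  induction rs generalizing km pos with
  | nil => exact h
  | cons r rs ih =>
    simp only [bAssign]
    by_cases hr : (km.get? r).isSome
    · simp only [hr, if_true]; exact ih km pos h
    · simp only [hr, Bool.false_eq_true, if_false]
      refine ih _ _ ?_
      rw [PySem.Dict.get?_insert_of_ne]
      · exact h
      · intro hkr; subst hkr; rw [h] at hr; simp at hr

lemma run_eq (servers : Int) (hs : 0 < servers) :
    ∀ (reqs : List Int) (dic : List (PySem.Dict Int Int)) (km : PySem.Dict Int Int)
      (ans : List (List Int)) (pos : Int),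
      PvInv servers dic km → ans.length = servers.toNat → 0 ≤ pos → pos < servers →
      (reqs.foldl (aStep servers) (dic, ans, pos)).2.1 =
        bBin (bAssign servers reqs km pos) reqs ans := by
  intro reqs
  induction reqs with
  | nil => intro dic km ans pos _ _ _ _; rfl
  | cons r rs ih =>
    intro dic km ans pos hInv hans hpos0 hpos1
    obtain ⟨hlen, hiff, hrange⟩ := hInv
    by_cases hr : (km.get? r).isSome = true
    · -- r already assigned: A's inner scan finds server j, B's key_map keeps r ↦ j
      obtain ⟨j, hj⟩ := Option.isSome_iff_exists.mp hr
      obtain ⟨hj0, hj1⟩ := hrange r j hj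
      have hjN : j.toNat < dic.length := by omega
      have hjcast : ((j.toNat : Int)) = j := Int.toNat_of_nonneg hj0
      have hget : PySem.List.pyGetD dic j PySem.Dict.empty = dic[j.toNat]'hjN :=
        PySem.List.pyGetD_eq_getElem dic _ hj0 (by omega)
      have hhit : ((PySem.List.pyGetD dic j PySem.Dict.empty).get? r).isSome = true := by
        rw [hget]
        exact (hiff j.toNat hjN r).mpr (by rw [hj, hjcast])
      have hmiss : ∀ j', (0:Int) ≤ j' → j' < j →
          ((PySem.List.pyGetD dic j' PySem.Dict.empty).get? r).isSome = false := by
        intro j' h0 h1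
        have hN : j'.toNat < dic.length := by omega
        rw [PySem.List.pyGetD_eq_getElem dic _ h0 (by omega)]
        by_contra hc
        simp only [Bool.not_eq_false] at hc
        have hsome : km.get? r = some ((j'.toNat : Int)) := (hiff j'.toNat hN r).mp hc
        rw [hj] at hsome
        have := Option.some.inj hsome
        omega
      have hstep : aStep servers (dic, ans, pos) r =
          (PySem.List.pySetD dic j ((PySem.List.pyGetD dic j PySem.Dict.empty).insert r 1),
           PySem.List.pySetD ans j (PySem.List.pyGetD ans j [] ++ [r]), pos) := by
        simp only [aStep, inner_found r dic ans servers 0 j hj0 hj1 hhit hmiss]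
        norm_num
      have hInv' : PvInv servers
          (PySem.List.pySetD dic j ((PySem.List.pyGetD dic j PySem.Dict.empty).insert r 1)) km := by
        refine ⟨by rw [PySem.List.length_pySetD]; exact hlen, ?_, hrange⟩
        intro jn hjn k
        simp only [PySem.List.pySetD_of_nonneg dic _ hj0] at hjn ⊢
        rw [List.getElem_set]
        by_cases hcase : j.toNat = jn
        · subst hcase
          rw [if_pos rfl, hget, PySem.Dict.get?_insert]
          by_cases hk : k = r
          · subst hk
            rw [if_pos rfl]
            simp only [Option.isSome_some, true_iff]
            rw [hj, hjcast]
          · rw [if_neg hk]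
            exact hiff j.toNat hjN k
        · rw [if_neg hcase]
          exact hiff jn (by simpa using hjn) k
      have hkmF : (bAssign servers rs km pos).getD r 0 = j :=
        PySem.Dict.getD_of_get?_eq_some _ _ (bAssign_mono servers rs km pos r j hj)
      rw [List.foldl_cons, hstep]
      simp only [bAssign, hr, if_true, bBin, hkmF]
      exact ih _ km _ pos hInv' (by rw [PySem.List.length_pySetD]; exact hans) hpos0 hpos1
    · -- r is new: A assigns it to server pos, B records key_map[r] = pos
      have hnone : km.get? r = none := by
        cases h : km.get? r with
        | none => rfl
        | some v => rw [h] at hr; simp at hr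
      have hposN : pos.toNat < dic.length := by omega
      have hposcast : ((pos.toNat : Int)) = pos := Int.toNat_of_nonneg hpos0
      have hmiss : ∀ j', (0:Int) ≤ j' → j' < servers →
          ((PySem.List.pyGetD dic j' PySem.Dict.empty).get? r).isSome = false := by
        intro j' h0 h1
        have hN : j'.toNat < dic.length := by omega
        rw [PySem.List.pyGetD_eq_getElem dic _ h0 (by omega)]
        by_contra hc
        simp only [Bool.not_eq_false] at hc
        have hsome : km.get? r = some ((j'.toNat : Int)) := (hiff j'.toNat hN r).mp hc
        rw [hnone] at hsome
        simp at hsome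
      have hstep : aStep servers (dic, ans, pos) r =
          (PySem.List.pySetD dic pos ((PySem.List.pyGetD dic pos PySem.Dict.empty).insert r 1),
           PySem.List.pySetD ans pos (PySem.List.pyGetD ans pos [] ++ [r]),
           PySem.Int.mod (pos + 1) servers) := by
        simp only [aStep, inner_none r dic ans servers 0 hmiss]
        norm_num
      have hgetp : PySem.List.pyGetD dic pos PySem.Dict.empty = dic[pos.toNat]'hposN :=
        PySem.List.pyGetD_eq_getElem dic _ hpos0 (by omega)
      have hInv' : PvInv servers
          (PySem.List.pySetD dic pos ((PySem.List.pyGetD dic pos PySem.Dict.empty).insert r 1))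
          (km.insert r pos) := by
        refine ⟨by rw [PySem.List.length_pySetD]; exact hlen, ?_, ?_⟩
        · intro jn hjn k
          simp only [PySem.List.pySetD_of_nonneg dic _ hpos0] at hjn ⊢
          rw [List.getElem_set, PySem.Dict.get?_insert]
          by_cases hk : k = r
          · subst hk
            rw [if_pos rfl]
            by_cases hcase : pos.toNat = jn
            · subst hcase
              rw [if_pos rfl, hgetp, PySem.Dict.get?_insert_self]
              simp only [Option.isSome_some, true_iff]
              rw [hposcast]
            · rw [if_neg hcase]
              constructor
              · intro hc
                have hsome : km.get? k = some ((jn : Int)) :=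
                  (hiff jn (by simpa using hjn) k).mp hc
                rw [hnone] at hsome
                exact absurd hsome (by simp)
              · intro hc
                have := Option.some.inj hc
                omega
          · rw [if_neg hk]
            by_cases hcase : pos.toNat = jn
            · subst hcase
              rw [if_pos rfl, hgetp, PySem.Dict.get?_insert, if_neg hk]
              exact hiff pos.toNat hposN k
            · rw [if_neg hcase]
              exact hiff jn (by simpa using hjn) k
        · intro k v hv
          rw [PySem.Dict.get?_insert] at hv
          by_cases hk : k = r
          · rw [if_pos hk] at hv
            have := Option.some.inj hv
            omega
          · rw [if_neg hk] at hv
            exact hrange k v hv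
      have hkm'r : (km.insert r pos).get? r = some pos := PySem.Dict.get?_insert_self km r pos
      have hkmF : (bAssign servers rs (km.insert r pos) (PySem.Int.mod (pos + 1) servers)).getD r 0 = pos :=
        PySem.Dict.getD_of_get?_eq_some _ _
          (bAssign_mono servers rs (km.insert r pos) (PySem.Int.mod (pos + 1) servers) r pos hkm'r)
      rw [List.foldl_cons, hstep]
      simp only [bAssign, hr, Bool.false_eq_true, if_false, bBin, hkmF]
      exact ih _ (km.insert r pos) _ (PySem.Int.mod (pos + 1) servers) hInv'
        (by rw [PySem.List.length_pySetD]; exact hans)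
        (PySem.Int.mod_nonneg _ hs) (PySem.Int.mod_lt _ hs)

-- ===== VERDICT (by name: the statement is the Claim_ definition above) =====
theorem solution_spec : Claim_equal_solution := by
  intro servers sticky requests _ hpre
  unfold Spec_solution solution solution_alt
  rcases hpre with h | h
  · subst h; rfl
  · refine run_eq servers (by omega) requests _ PySem.Dict.empty _ 0 ?_ ?_ le_rfl (by omega)
    · refine ⟨?_, ?_, ?_⟩
      · simp [PySem.List.length_pyRange_one]
      · intro jn hjn k
        simp
      · intro k v hv
        simp [PySem.Dict.get?_empty] at hv
    · simp [PySem.List.length_pyRange_one]
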